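-- pv_equiv track=rewrite | github.com/bracko87/ProPeloton-Manager | weather_normals_builder.py | choose_best_geocode_result
-- ===== SOURCE A (Python) =====
-- from typing import Dict, Iterable, List, Optional, Tuple
--
-- def choose_best_geocode_result(country_name: str, results: List[dict]) -> Optional[dict]:
--     if not results:
--         return None
--
--     country_name_lower = country_name.strip().lower()
--
--     # Prefer exact name match
--     for r in results:
--         rname = str(r.get("name", "")).strip().lower()
--         if rname == country_name_lower:
--             return r
--
--     # Prefer admin/country-ish records if exact match is missing
--     for r in results:
--         feature_code = str(r.get("feature_code", "")).upper()
--         if feature_code in {"PCLI", "PCLD", "PCLF", "PCLS", "PCLIX"}: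
--             return r
--
--     # Otherwise first result
--     return results[0]
-- ===== SOURCE B (Python) =====
-- def choose_best_geocode_result(country_name, results):
--     if not results:
--         return None
--
--     target = country_name.strip().lower()
--     PCL = {"PCLI", "PCLD", "PCLF", "PCLS", "PCLIX"}
--
--     def tier(r):
--         if str(r.get("name", "")).strip().lower() == target:
--             return 0
--         if str(r.get("feature_code", "")).upper() in PCL:
--             return 1
--         return 2
--
--     return min(results, key=tier)
-- ===== Notes on version B (the rewrite author's own statement) =====
-- stated objective: simpler
-- what changed: Replaces A's two sequential full scans plus an indexed fallback by a single priority (tier) function and one min-by-key selection that keeps the first element of the best tier.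
import Mathlib
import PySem

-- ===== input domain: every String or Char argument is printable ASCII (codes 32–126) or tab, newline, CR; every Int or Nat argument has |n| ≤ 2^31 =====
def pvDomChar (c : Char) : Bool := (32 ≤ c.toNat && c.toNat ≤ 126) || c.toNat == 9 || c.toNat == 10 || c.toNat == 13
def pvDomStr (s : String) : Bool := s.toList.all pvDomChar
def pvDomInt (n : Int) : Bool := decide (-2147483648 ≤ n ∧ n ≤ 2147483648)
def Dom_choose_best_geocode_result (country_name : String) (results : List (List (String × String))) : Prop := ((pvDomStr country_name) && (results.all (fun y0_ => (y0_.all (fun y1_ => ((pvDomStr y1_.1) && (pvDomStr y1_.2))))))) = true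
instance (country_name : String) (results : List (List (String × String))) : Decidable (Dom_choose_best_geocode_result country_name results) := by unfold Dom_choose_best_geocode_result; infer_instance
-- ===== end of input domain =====

-- B replaces A's two sequential scans and indexed fallback by one min-by-key selection
-- over a three-valued priority function (objective: simpler).

-- ===== PORT A =====
-- r.get(k, "") on the association-list dict (first match wins)
def pvAGet (r : List (String × String)) (k : String) : String :=
  match r.find? (fun p => p.1 == k) with
  | some p => p.2
  | none => ""

def pvAIsPcl (fc : String) : Bool :=
  fc == "PCLI" || fc == "PCLD" || fc == "PCLF" || fc == "PCLS" || fc == "PCLIX"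

def choose_best_geocode_result (country_name : String) (results : List (List (String × String))) : Option (List (String × String)) :=
  if results.isEmpty then none else
  let country_name_lower := PySem.Str.lower (PySem.Str.strip country_name)
  match results.find? (fun r => PySem.Str.lower (PySem.Str.strip (pvAGet r "name")) == country_name_lower) with
  | some r => some r
  | none =>
    match results.find? (fun r => pvAIsPcl (PySem.Str.upper (pvAGet r "feature_code"))) with
    | some r => some r
    | none => PySem.List.pyGet? results 0

-- ===== PORT B =====
-- r.get(k, "") on the association-list dict (first match wins)
def pvBGet (r : List (String × String)) (k : String) : String :=
  match r.find? (fun p => p.1 == k) with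
  | some p => p.2
  | none => ""

def pvBIsPcl (fc : String) : Bool :=
  fc == "PCLI" || fc == "PCLD" || fc == "PCLF" || fc == "PCLS" || fc == "PCLIX"

def pvTier (target : String) (r : List (String × String)) : Int :=
  if PySem.Str.lower (PySem.Str.strip (pvBGet r "name")) == target then 0
  else if pvBIsPcl (PySem.Str.upper (pvBGet r "feature_code")) then 1
  else 2

def choose_best_geocode_result_alt (country_name : String) (results : List (List (String × String))) : Option (List (String × String)) :=
  if results.isEmpty then none else
  PySem.List.min? results (pvTier (PySem.Str.lower (PySem.Str.strip country_name)))

-- ===== PRECONDITION & SPEC =====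
def Spec_choose_best_geocode_result (country_name : String) (results : List (List (String × String))) (out : Option (List (String × String))) : Prop := out = choose_best_geocode_result_alt country_name results
instance (country_name : String) (results : List (List (String × String))) (out : Option (List (String × String))) : Decidable (Spec_choose_best_geocode_result country_name results out) := by unfold Spec_choose_best_geocode_result; infer_instance

-- ===== CLAIM (what is proved, stated in full; the proofs are below) =====
def Claim_equal_choose_best_geocode_result : Prop := ∀ (country_name : String) (results : List (List (String × String))), Dom_choose_best_geocode_result country_name results → Spec_choose_best_geocode_result country_name results (choose_best_geocode_result country_name results)

-- ===== LEMMAS AND PROOFS =====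

-- the fold step of PySem.List.min? for the tier key built from predicates p, q
def pvKey {α : Type} (p q : α → Bool) (x : α) : Int :=
  if p x then 0 else if q x then 1 else 2

def pvStep {α : Type} (p q : α → Bool) (acc : Option α) (x : α) : Option α :=
  match acc with
  | none => some x
  | some m => if pvKey p q x < pvKey p q m then some x else some m

theorem pvFold0 {α : Type} (p q : α → Bool) (xs : List α) (m : α) (hm : p m = true) :
    xs.foldl (pvStep p q) (some m) = some m := by
  induction xs with
  | nil => rfl
  | cons x t ih =>
    have hst : pvStep p q (some m) x = some m := by
      simp only [pvStep, pvKey, hm]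
      split_ifs <;> simp_all
    rw [List.foldl_cons, hst, ih]

theorem pvFold1 {α : Type} (p q : α → Bool) (xs : List α) (m : α) (hm : p m = false) (hq : q m = true) :
    xs.foldl (pvStep p q) (some m) =
      (match xs.find? p with
       | some r => some r
       | none => some m) := by
  induction xs generalizing m with
  | nil => rfl
  | cons x t ih =>
    by_cases hx : p x = true
    · have hst : pvStep p q (some m) x = some x := by
        simp only [pvStep, pvKey, hm, hq, hx]; norm_num
      rw [List.foldl_cons, hst, pvFold0 p q t x hx, List.find?_cons_of_pos hx]
    · have hx' : p x = false := by simpa using hx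
      have hst : pvStep p q (some m) x = some m := by
        simp only [pvStep, pvKey, hm, hq, hx']
        split_ifs <;> simp_all
      rw [List.foldl_cons, hst, ih m hm hq, List.find?_cons_of_neg hx]

theorem pvFold2 {α : Type} (p q : α → Bool) (xs : List α) (m : α) (hm : p m = false) (hq : q m = false) :
    xs.foldl (pvStep p q) (some m) =
      (match xs.find? p with
       | some r => some r
       | none =>
         match xs.find? q with
         | some r => some r
         | none => some m) := by
  induction xs generalizing m with
  | nil => rfl
  | cons x t ih =>
    by_cases hx : p x = true
    · have hst : pvStep p q (some m) x = some x := by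
        simp only [pvStep, pvKey, hm, hq, hx]; norm_num
      rw [List.foldl_cons, hst, pvFold0 p q t x hx, List.find?_cons_of_pos hx]
    · have hx' : p x = false := by simpa using hx
      by_cases hqx : q x = true
      · have hst : pvStep p q (some m) x = some x := by
          simp only [pvStep, pvKey, hm, hq, hx', hqx]; norm_num
        rw [List.foldl_cons, hst, pvFold1 p q t x hx' hqx,
          List.find?_cons_of_neg hx, List.find?_cons_of_pos hqx]
      · have hqx' : q x = false := by simpa using hqx
        have hst : pvStep p q (some m) x = some m := by
          simp only [pvStep, pvKey, hm, hq, hx', hqx']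
          split_ifs <;> simp_all
        rw [List.foldl_cons, hst, ih m hm hq,
          List.find?_cons_of_neg hx, List.find?_cons_of_neg hqx]

theorem pvMin3 {α : Type} (p q : α → Bool) (x : α) (t : List α) :
    PySem.List.min? (x :: t) (pvKey p q) =
      (match (x :: t).find? p with
       | some r => some r
       | none =>
         match (x :: t).find? q with
         | some r => some r
         | none => some x) := by
  have base : PySem.List.min? (x :: t) (pvKey p q) = t.foldl (pvStep p q) (some x) := rfl
  rw [base]
  by_cases hx : p x = true
  · rw [pvFold0 p q t x hx, List.find?_cons_of_pos hx]
  · have hx' : p x = false := by simpa using hx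
    by_cases hqx : q x = true
    · rw [pvFold1 p q t x hx' hqx, List.find?_cons_of_neg hx, List.find?_cons_of_pos hqx]
    · have hqx' : q x = false := by simpa using hqx
      rw [pvFold2 p q t x hx' hqx', List.find?_cons_of_neg hx, List.find?_cons_of_neg hqx]

theorem pvTier_eq_key (target : String) :
    pvTier target = pvKey
      (fun r => PySem.Str.lower (PySem.Str.strip (pvAGet r "name")) == target)
      (fun r => pvAIsPcl (PySem.Str.upper (pvAGet r "feature_code"))) := by
  funext r
  simp [pvTier, pvKey, pvBGet, pvAGet, pvBIsPcl, pvAIsPcl]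

-- ===== VERDICT (by name: the statement is the Claim_ definition above) =====
theorem choose_best_geocode_result_spec : Claim_equal_choose_best_geocode_result := by
  intro country_name results _
  show choose_best_geocode_result country_name results = choose_best_geocode_result_alt country_name results
  unfold choose_best_geocode_result choose_best_geocode_result_alt
  cases results with
  | nil => rfl
  | cons x t =>
    have hget : PySem.List.pyGet? (x :: t) 0 = some x := by
      simp [PySem.List.pyGet?, PySem.List.pyIdx?]
    simp only [List.isEmpty_cons]
    rw [pvTier_eq_key, pvMin3, hget]
    split
    next => rfl
    next =>
      split
      next r h2 => rw [h2]
      next h2 =>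
        rw [h2]
        split
        next r h3 => rw [h3]
        next h3 => rw [h3]
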